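-- pv_equiv track=rewrite | github.com/Ro-Data/COGS-Tracking | blog_create_order_margin_table.py | group_by_item
-- ===== SOURCE A (Python) =====
-- import collections
--
-- def group_by_item(columns):
--     groups = collections.defaultdict(set)
--     for column in columns:
--         parts = column.split(' ')
--         key = parts[0]
--         val = ' '.join(parts[1:])
--         groups[key].add(val)
--     for key in groups:
--         groups[key] = sorted(groups[key])
--     return sorted(groups.items())
-- ===== SOURCE B (Python) =====
-- def group_by_item(columns):
--     pairs = []
--     for column in columns:
--         parts = column.split(' ')
--         pairs.append((parts[0], ' '.join(parts[1:])))
--     pairs.sort()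
--     result = []
--     for key, val in reversed(pairs):
--         if result and result[0][0] == key:
--             vals = result[0][1]
--             if vals[0] != val:
--                 result[0] = (key, [val] + vals)
--         else:
--             result[0:0] = [(key, [val])]
--     return result
-- ===== Notes on version B (the rewrite author's own statement) =====
-- stated objective: alternative
-- what changed: Replaces A's defaultdict(set)-then-per-key-sort grouping by one flat (key,val) pair list that is tuple-sorted once and then grouped in a single reverse pass with adjacent-duplicate removal, building the result front-to-back by prepending.
import Mathlib
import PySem

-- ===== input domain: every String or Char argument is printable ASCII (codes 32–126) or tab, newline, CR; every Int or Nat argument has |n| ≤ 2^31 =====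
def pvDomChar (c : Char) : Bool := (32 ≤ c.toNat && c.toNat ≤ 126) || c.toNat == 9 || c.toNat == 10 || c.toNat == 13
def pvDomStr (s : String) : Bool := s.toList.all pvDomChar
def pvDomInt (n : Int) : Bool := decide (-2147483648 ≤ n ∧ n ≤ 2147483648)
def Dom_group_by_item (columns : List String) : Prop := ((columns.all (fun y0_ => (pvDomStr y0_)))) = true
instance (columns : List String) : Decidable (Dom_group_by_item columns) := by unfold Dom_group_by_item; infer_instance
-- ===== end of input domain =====

-- B groups by one flat tuple-sorted (key,val) list walked once in reverse with adjacent-dedup, instead of A's defaultdict(set) + per-key sort (alternative structure, no speed claim).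

-- ===== PORT A =====
-- shared line of both Pythons: parts = column.split(' '); key = parts[0]; val = ' '.join(parts[1:])
-- (split(' ') with a nonempty separator never raises and never returns [], so the `.getD []` default is unreachable)
def pvKeyVal (column : String) : String × String :=
  let parts := (PySem.Str.split? column " ").getD []
  (PySem.List.pyGetD parts 0 "", PySem.Str.join " " (PySem.List.slice parts (some 1)))

-- groups = defaultdict(set); for column in columns: groups[key].add(val)
def pvGroupsA (columns : List String) : PySem.Dict String (PySem.Set String) :=
  columns.foldl (fun d column =>
    d.modify (pvKeyVal column).1 PySem.Set.empty (fun s => PySem.Set.add s (pvKeyVal column).2))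
    PySem.Dict.empty

def group_by_item (columns : List String) : List (String × List String) :=
  let groups := pvGroupsA columns
  -- for key in groups: groups[key] = sorted(groups[key])   (in-place value update, key order kept)
  let items := groups.items.map (fun p => (p.1, PySem.List.sorted p.2 (fun v => v) false))
  -- sorted(groups.items()): dict keys are unique, so Python's tuple comparison is decided by the
  -- first component alone; the stable key-sort below is therefore exact
  PySem.List.sorted items (fun p => p.1) false

-- ===== PORT B =====
-- one reversed-iteration step of B's grouping loop (result[0] inspection/update, prepend otherwise)
def pvBStep (p : String × String) (res : List (String × List String)) : List (String × List String) :=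
  match res with
  | (k, vs) :: rest =>
      if p.1 = k then
        if vs.headD "" = p.2 then (k, vs) :: rest else (k, p.2 :: vs) :: rest
      else (p.1, [p.2]) :: (k, vs) :: rest
  | [] => [(p.1, [p.2])]

def group_by_item_alt (columns : List String) : List (String × List String) :=
  let pairs := columns.map pvKeyVal
  -- pairs.sort(): tuple comparison = key lambda p: (p[0], p[1])
  let sortedPairs := PySem.List.sorted2 pairs (fun p => p.1) (fun p => p.2) false
  -- for key, val in reversed(sortedPairs): … (a foldr over sortedPairs)
  sortedPairs.foldr pvBStep []

-- ===== PRECONDITION & SPEC =====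
def Spec_group_by_item (columns : List String) (out : List (String × List String)) : Prop := out = group_by_item_alt columns
instance (columns : List String) (out : List (String × List String)) : Decidable (Spec_group_by_item columns out) := by unfold Spec_group_by_item; infer_instance

-- ===== CLAIM (what is proved, stated in full; the proofs are below) =====
def Claim_equal_group_by_item : Prop := ∀ (columns : List String), Dom_group_by_item columns → Spec_group_by_item columns (group_by_item columns)

-- ===== LEMMAS AND PROOFS =====

-- canonical form both ports are reduced to: keys of the pair list, sorted, each with its
-- distinct values sorted
def pvKeys (ps : List (String × String)) : List String :=
  PySem.List.sorted (PySem.Set.ofList (ps.map Prod.fst)) (fun k => k) false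

def pvVals (ps : List (String × String)) (k : String) : List String :=
  (ps.filter (fun p => p.1 == k)).map Prod.snd

def pvCanon (ps : List (String × String)) : List (String × List String) :=
  (pvKeys ps).map (fun k => (k, PySem.List.sorted (PySem.Set.ofList (pvVals ps k)) (fun v => v) false))

-- adjacent-duplicate removal (the effect of B's inner dedup test)
def pvDedupAdj : List String → List String
  | [] => []
  | v :: rest =>
    match pvDedupAdj rest with
    | [] => [v]
    | w :: t => if w = v then w :: t else v :: w :: t

-- the sorted pair list, seen as one block of (k, v) pairs per key
def pvBlocks (ps : List (String × String)) : List (String × String) :=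
  (pvKeys ps).flatMap (fun k => (PySem.List.sorted (pvVals ps k) (fun v => v) false).map (fun v => (k, v)))

-- ---- facts about pvDedupAdj ----

lemma pvDedupAdj_cons (v : String) (rest : List String) :
    pvDedupAdj (v :: rest) = match pvDedupAdj rest with
      | [] => [v]
      | w :: t => if w = v then w :: t else v :: w :: t := rfl

lemma pvDedupAdj_ne_nil (l : List String) (h : l ≠ []) : pvDedupAdj l ≠ [] := by
  cases l with
  | nil => exact absurd rfl h
  | cons v rest =>
    rw [pvDedupAdj_cons]
    rcases hr : pvDedupAdj rest with _ | ⟨w, t⟩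
    · simp
    · by_cases hwv : w = v <;> simp [hwv]

lemma pvMem_dedupAdj (l : List String) : ∀ x, x ∈ pvDedupAdj l ↔ x ∈ l := by
  induction l with
  | nil => simp [pvDedupAdj]
  | cons v rest ih =>
    intro x
    rw [pvDedupAdj_cons]
    rcases hr : pvDedupAdj rest with _ | ⟨w, t⟩
    · have hnx : x ∉ rest := fun hx => by simpa [hr] using (ih x).2 hx
      simp [hnx]
    · have hmem : ∀ y, y ∈ w :: t ↔ y ∈ rest := fun y => hr ▸ ih y
      have hw : w ∈ rest := (hmem w).1 (by simp)
      have hx := hmem x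
      dsimp only
      by_cases hwv : w = v
      · subst hwv
        rw [if_pos rfl]
        simp only [List.mem_cons] at hx ⊢
        constructor
        · intro h; exact Or.inr (hx.1 h)
        · rintro (h | h)
          · subst h; exact hx.2 hw
          · exact hx.2 h
      · rw [if_neg hwv]
        simp only [List.mem_cons] at hx ⊢
        rw [hx]

lemma pvDedupAdj_pairwise (l : List String) (h : l.Pairwise (· ≤ ·)) :
    (pvDedupAdj l).Pairwise (· < ·) := by
  induction l with
  | nil => simp [pvDedupAdj]
  | cons v rest ih =>
    rw [List.pairwise_cons] at h
    obtain ⟨hle, hrest⟩ := h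
    have ihp := ih hrest
    rw [pvDedupAdj_cons]
    rcases hr : pvDedupAdj rest with _ | ⟨w, t⟩
    · simp
    · rw [hr] at ihp
      have hw : w ∈ rest := (pvMem_dedupAdj rest w).1 (by simp [hr])
      dsimp only
      by_cases hwv : w = v
      · simpa [hwv] using ihp
      · rw [if_neg hwv]
        refine List.pairwise_cons.mpr ⟨?_, ihp⟩
        intro y hy
        have hyrest : y ∈ rest := (pvMem_dedupAdj rest y).1 (hr ▸ hy)
        have hvy : v ≤ y := hle y hyrest
        rcases List.mem_cons.mp hy with h1 | h2
        · subst h1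
          exact lt_of_le_of_ne hvy (fun hh => hwv hh.symm)
        · have hwy : w < y := (List.pairwise_cons.mp ihp).1 y h2
          exact lt_of_le_of_lt (hle w hw) hwy

-- sorted2 with two keys is sorted with the lexicographic key
lemma pvSorted2_eq_sorted_lex {α κ₁ κ₂ : Type} [LinearOrder κ₁] [LinearOrder κ₂]
    (xs : List α) (k1 : α → κ₁) (k2 : α → κ₂) :
    PySem.List.sorted2 xs k1 k2 false = PySem.List.sorted xs (fun x => toLex (k1 x, k2 x)) false := by
  unfold PySem.List.sorted2 PySem.List.sorted
  simp only [if_neg (by simp : ¬ (false = true))]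
  congr 1
  funext acc x
  congr 1
  funext a b
  have : (toLex (k1 a, k2 a) < toLex (k1 b, k2 b)) ↔ (k1 a < k1 b ∨ (k1 a = k1 b ∧ k2 a < k2 b)) := Prod.Lex.lt_iff
  by_cases h1 : k1 a < k1 b
  · simp [h1, this]
  · by_cases h2 : k1 b < k1 a
    · have hne : ¬ (k1 a = k1 b) := fun hh => absurd (hh ▸ h2) (lt_irrefl _)
      simp [h1, h2, this, hne]
    · have heq : k1 a = k1 b := le_antisymm (not_lt.mp h2) (not_lt.mp h1)
      by_cases h3 : k2 a < k2 b <;>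
        simp [h3, Prod.Lex.lt_iff, heq]
lemma pvDedupAdj_sorted_eq (vs : List String) :
    PySem.List.sorted (PySem.Set.ofList vs) (fun v => v) false
      = pvDedupAdj (PySem.List.sorted vs (fun v => v) false) := by
  apply PySem.List.sorted_eq_of_perm_of_pairwise_lt
  · rw [List.perm_ext_iff_of_nodup]
    · intro a
      rw [pvMem_dedupAdj, PySem.List.mem_sorted, PySem.Set.mem_ofList]
    · exact (pvDedupAdj_pairwise _ (PySem.List.sorted_pairwise vs (fun v => v))).nodup
    · exact PySem.Set.nodup_ofList vs
  · exact pvDedupAdj_pairwise _ (PySem.List.sorted_pairwise vs (fun v => v))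

-- grouping a list by its (distinct, covering) keys is a permutation of it
lemma pvPerm_flatMap_filter (ps : List (String × String)) (K : List String)
    (hnd : K.Nodup) (hcov : ∀ p ∈ ps, p.1 ∈ K) :
    (K.flatMap (fun k => ps.filter (fun p => p.1 == k))).Perm ps := by
  induction K generalizing ps with
  | nil =>
    have : ps = [] := by
      cases ps with
      | nil => rfl
      | cons p t => exact absurd (hcov p (by simp)) (by simp)
    simp [this]
  | cons k K ih =>
    rw [List.nodup_cons] at hnd
    have hsplit : (ps.filter (fun p => p.1 == k) ++ ps.filter (fun p => ¬ (p.1 == k))).Perm ps := by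
      simpa using List.filter_append_perm (fun p => p.1 == k) ps
    have hcov' : ∀ p ∈ ps.filter (fun p => ¬ (p.1 == k)), p.1 ∈ K := by
      intro p hp
      rw [List.mem_filter] at hp
      have hm := hcov p hp.1
      simp at hp
      rcases List.mem_cons.mp hm with h | h
      · exact absurd h hp.2
      · exact h
    have ihh := ih (ps.filter (fun p => ¬ (p.1 == k))) hnd.2 hcov'
    have hcomm : ∀ k' ∈ K, (ps.filter (fun p => ¬ (p.1 == k))).filter (fun p => p.1 == k')
        = ps.filter (fun p => p.1 == k') := by
      intro k' hk'
      rw [List.filter_filter]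
      apply List.filter_congr
      intro p _
      by_cases h : p.1 = k'
      · simp only [h, BEq.rfl, Bool.true_and, decide_eq_true_eq]
        simp only [beq_iff_eq]
        exact fun hh => hnd.1 (hh ▸ hk')
      · simp [h]
    rw [List.flatMap_cons]
    have heq : (K.flatMap fun k' => (ps.filter (fun p => ¬ (p.1 == k))).filter (fun p => p.1 == k'))
        = K.flatMap fun k' => ps.filter (fun p => p.1 == k') := by
      apply List.flatMap_congr
      intro k' hk'
      exact hcomm k' hk'
    rw [← heq]
    exact (List.Perm.append_left _ ihh).trans hsplit

-- ---- A side ----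

lemma pvGetD_fold (l : List (String × String)) (d : PySem.Dict String (PySem.Set String)) (k : String) :
    (l.foldl (fun d p => d.modify p.1 PySem.Set.empty (fun s => PySem.Set.add s p.2)) d).getD k PySem.Set.empty
      = ((l.filter (fun p => p.1 == k)).map Prod.snd).foldl PySem.Set.add (d.getD k PySem.Set.empty) := by
  induction l generalizing d with
  | nil => simp
  | cons p l ih =>
    rw [List.foldl_cons, ih, List.filter_cons]
    by_cases h : p.1 = k
    · simp [h]
    · simp [h, PySem.Dict.getD_modify, Ne.symm h]

lemma pvGroupsA_eq (columns : List String) :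
    pvGroupsA columns
      = (columns.map pvKeyVal).foldl
          (fun d p => d.modify p.1 PySem.Set.empty (fun s => PySem.Set.add s p.2)) PySem.Dict.empty := by
  rw [List.foldl_map]
  rfl

lemma pvKeysA (columns : List String) :
    (pvGroupsA columns).keys = PySem.Set.ofList ((columns.map pvKeyVal).map Prod.fst) := by
  rw [pvGroupsA_eq]
  have := PySem.Dict.keys_foldl_modify_key (columns.map pvKeyVal) Prod.fst PySem.Set.empty
      (fun _ p => fun s => PySem.Set.add s p.2) PySem.Dict.empty
  simpa using this

lemma pvNodupKeysA (columns : List String) : (pvGroupsA columns).keys.Nodup := by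
  rw [pvGroupsA_eq]
  exact PySem.Dict.nodup_keys_foldl_modify_key (columns.map pvKeyVal) Prod.fst PySem.Set.empty
      (fun _ p => fun s => PySem.Set.add s p.2) PySem.Dict.empty (by simp)

lemma pvGetDA (columns : List String) (k : String) :
    (pvGroupsA columns).getD k PySem.Set.empty
      = PySem.Set.ofList (pvVals (columns.map pvKeyVal) k) := by
  rw [pvGroupsA_eq, pvGetD_fold]
  rw [PySem.Dict.getD_empty]
  rfl

lemma pvA_eq_canon (columns : List String) :
    group_by_item columns = pvCanon (columns.map pvKeyVal) := by
  show PySem.List.sorted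
      ((pvGroupsA columns).items.map (fun p => (p.1, PySem.List.sorted p.2 (fun v => v) false)))
      (fun p => p.1) false = pvCanon (columns.map pvKeyVal)
  have hitems : (pvGroupsA columns).items
      = (pvGroupsA columns).keys.map (fun k => (k, (pvGroupsA columns).getD k PySem.Set.empty)) :=
    PySem.Dict.items_eq_map_keys _ (pvNodupKeysA columns) _
  rw [hitems, pvKeysA, List.map_map]
  simp only [Function.comp_def, pvGetDA]
  apply PySem.List.sorted_eq_of_perm_of_pairwise_lt
  · exact List.Perm.map _ (PySem.List.sorted_perm _ _ _)
  · have hlt := PySem.List.sorted_ofList_pairwise_lt ((columns.map pvKeyVal).map Prod.fst)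
    unfold pvCanon
    rw [List.pairwise_map]
    exact hlt.imp (fun h => h)

lemma pvFoldr_block (k : String) (vs : List String) (acc : List (String × List String))
    (hvs : vs ≠ []) (hacc : ∀ x t, acc = x :: t → x.1 ≠ k) :
    ((vs.map (fun v => (k, v))).foldr pvBStep acc) = (k, pvDedupAdj vs) :: acc := by
  induction vs with
  | nil => exact absurd rfl hvs
  | cons v vs ih =>
    rw [List.map_cons, List.foldr_cons]
    by_cases hv : vs = []
    · subst hv
      simp only [List.map_nil, List.foldr_nil]
      cases acc with
      | nil => rfl
      | cons x t =>
        have hxk : x.1 ≠ k := hacc x t rfl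
        obtain ⟨xk, xv⟩ := x
        simp [pvBStep, Ne.symm hxk, pvDedupAdj]
    · rw [ih hv]
      rcases hdr : pvDedupAdj vs with _ | ⟨w, t2⟩
      · exact absurd hdr (pvDedupAdj_ne_nil vs hv)
      · show pvBStep (k, v) ((k, w :: t2) :: acc) = (k, pvDedupAdj (v :: vs)) :: acc
        simp only [pvBStep]
        have : pvDedupAdj (v :: vs) = if w = v then w :: t2 else v :: w :: t2 := by
          rw [show pvDedupAdj (v :: vs) = (match pvDedupAdj vs with
            | [] => [v] | w :: t => if w = v then w :: t else v :: w :: t) from rfl, hdr]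
        rw [this]
        by_cases hwv : w = v
        · simp [hwv]
        · simp [hwv]


lemma pvFoldr_blocks (ps : List (String × String)) (K : List String)
    (hK : K.Pairwise (· < ·)) (hne : ∀ k ∈ K, (PySem.List.sorted (pvVals ps k) (fun v => v) false) ≠ []) :
    ((K.flatMap (fun k => (PySem.List.sorted (pvVals ps k) (fun v => v) false).map (fun v => (k, v)))).foldr pvBStep [])
      = K.map (fun k => (k, pvDedupAdj (PySem.List.sorted (pvVals ps k) (fun v => v) false))) := by
  induction K with
  | nil => rfl
  | cons k K ih =>
    rw [List.pairwise_cons] at hK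
    rw [List.flatMap_cons, List.foldr_append, ih hK.2 (fun k' hk' => hne k' (by simp [hk'])), List.map_cons]
    apply pvFoldr_block _ _ _ (hne k (by simp))
    intro x t hx
    cases K with
    | nil => simp at hx
    | cons k2 K2 =>
      rw [List.map_cons] at hx
      injection hx with h1 _
      rw [← h1]
      exact ne_of_gt (hK.1 k2 (by simp))

-- ---- B side ----

lemma pvFlatMap_perm {α β : Type} (K : List α) (f g : α → List β)
    (h : ∀ k ∈ K, (f k).Perm (g k)) : (K.flatMap f).Perm (K.flatMap g) := by
  induction K with
  | nil => rfl
  | cons k K ih =>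
    rw [List.flatMap_cons, List.flatMap_cons]
    exact (h k (by simp)).append (ih (fun k' hk' => h k' (by simp [hk'])))

lemma pvBlock_map (ps : List (String × String)) (k : String) :
    ((pvVals ps k).map (fun v => (k, v))) = ps.filter (fun p => p.1 == k) := by
  unfold pvVals
  rw [List.map_map]
  have : ∀ p ∈ ps.filter (fun p => p.1 == k), ((fun v => (k, v)) ∘ Prod.snd) p = p := by
    intro p hp
    rw [List.mem_filter] at hp
    have : p.1 = k := by simpa using hp.2
    simp [Function.comp, ← this]
  rw [List.map_congr_left this]
  simp

lemma pvBlocks_perm (ps : List (String × String)) : (pvBlocks ps).Perm ps := by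
  unfold pvBlocks
  have h1 : (pvBlocks ps).Perm ((pvKeys ps).flatMap (fun k => ps.filter (fun p => p.1 == k))) := by
    apply pvFlatMap_perm
    intro k _
    exact (List.Perm.map _ (PySem.List.sorted_perm _ _ _)).trans (by rw [pvBlock_map])
  refine h1.trans ?_
  apply pvPerm_flatMap_filter
  · exact (PySem.List.sorted_ofList_pairwise_lt (ps.map Prod.fst)).imp (fun h => ne_of_lt h)
  · intro p hp
    unfold pvKeys
    rw [PySem.List.mem_sorted, PySem.Set.mem_ofList]
    exact List.mem_map_of_mem hp

lemma pvBlocks_pairwise (ps : List (String × String)) :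
    (pvBlocks ps).Pairwise (fun a b => toLex a ≤ toLex b) := by
  unfold pvBlocks
  have hK := PySem.List.sorted_ofList_pairwise_lt (ps.map Prod.fst)
  generalize hKs : pvKeys ps = K at *
  rw [show pvKeys ps = PySem.List.sorted (PySem.Set.ofList (ps.map Prod.fst)) (fun k => k) false from rfl] at hKs
  rw [hKs] at hK
  clear hKs
  induction K with
  | nil => simp
  | cons k K ih =>
    rw [List.pairwise_cons] at hK
    rw [List.flatMap_cons]
    rw [List.pairwise_append]
    refine ⟨?_, ih hK.2, ?_⟩
    · rw [List.pairwise_map]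
      have hsp := PySem.List.sorted_pairwise (pvVals ps k) (fun v => v)
      refine hsp.imp ?_
      intro a b hab
      exact Prod.Lex.le_iff.mpr (Or.inr ⟨rfl, hab⟩)
    · intro x hx y hy
      rw [List.mem_map] at hx
      obtain ⟨v, _, hv⟩ := hx
      rw [List.mem_flatMap] at hy
      obtain ⟨k', hk', hy'⟩ := hy
      rw [List.mem_map] at hy'
      obtain ⟨w, _, hw⟩ := hy'
      subst hv hw
      exact le_of_lt (Prod.Lex.lt_iff.mpr (Or.inl (hK.1 k' hk')))

lemma pvSortedPairs_eq_blocks (ps : List (String × String)) :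
    PySem.List.sorted ps (fun p => toLex ((p.1, p.2) : String × String)) false = pvBlocks ps := by
  refine PySem.List.eq_of_perm_of_pairwise_le_of_injective
      (fun p => toLex ((p.1, p.2) : String × String)) ?_ ?_ ?_ ?_
  · intro a b hab
    exact hab
  · exact (PySem.List.sorted_perm ps _ false).trans (pvBlocks_perm ps).symm
  · exact PySem.List.sorted_pairwise ps _
  · exact pvBlocks_pairwise ps

lemma pvKeys_pairwise (ps : List (String × String)) : (pvKeys ps).Pairwise (· < ·) :=
  PySem.List.sorted_ofList_pairwise_lt (ps.map Prod.fst)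

lemma pvVals_ne_nil (ps : List (String × String)) (k : String) (hk : k ∈ pvKeys ps) :
    pvVals ps k ≠ [] := by
  unfold pvKeys at hk
  rw [PySem.List.mem_sorted, PySem.Set.mem_ofList, List.mem_map] at hk
  obtain ⟨p, hp, hpk⟩ := hk
  have : p.2 ∈ pvVals ps k := by
    unfold pvVals
    exact List.mem_map_of_mem (List.mem_filter.mpr ⟨hp, by simp [hpk]⟩)
  exact List.ne_nil_of_mem this

lemma pvB_eq_canon (columns : List String) :
    group_by_item_alt columns = pvCanon (columns.map pvKeyVal) := by
  show ((PySem.List.sorted2 (columns.map pvKeyVal) (fun p => p.1) (fun p => p.2) false).foldr pvBStep [])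
      = pvCanon (columns.map pvKeyVal)
  rw [pvSorted2_eq_sorted_lex, pvSortedPairs_eq_blocks]
  unfold pvBlocks
  rw [pvFoldr_blocks _ _ (pvKeys_pairwise _)
      (fun k hk => by
        rw [Ne, PySem.List.sorted_eq_nil_iff]
        exact pvVals_ne_nil _ k hk)]
  unfold pvCanon
  apply List.map_congr_left
  intro k _
  rw [pvDedupAdj_sorted_eq]

-- ===== VERDICT (by name: the statement is the Claim_ definition above) =====
theorem group_by_item_spec : Claim_equal_group_by_item := by
  intro columns _
  show group_by_item columns = group_by_item_alt columns
  rw [pvA_eq_canon, pvB_eq_canon]
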